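-- pv_equiv track=rewrite | github.com/MikeLeon2810/Manejo-de-Datos | Práctica 1/Practica_1-Ejercicio_1.py | ordena_positivos
-- ===== SOURCE A (Python) =====
-- def ordena_positivos(lista):
--     # obtener los positivos
--     positivos = [x for x in lista if x > 0]
--
--     # ordenarlos
--     positivos.sort()
--
--     resultado = []
--     i = 0  # índice para recorrer positivos
--
--     for x in lista:
--         if x > 0:
--             resultado.append(positivos[i])
--             i += 1
--         else:
--             resultado.append(x)
--
--     return resultado
-- ===== SOURCE B (Python) =====
-- def ordena_positivos(lista):
--     # Hand-rolled merge sort of the positives, then a back-to-front rebuild that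
--     # pops the largest remaining sorted value at each positive slot.
--     def mezcla(a, b):
--         out = []
--         i = j = 0
--         while i < len(a) and j < len(b):
--             if b[j] < a[i]:
--                 out.append(b[j]); j += 1
--             else:
--                 out.append(a[i]); i += 1
--         out.extend(a[i:])
--         out.extend(b[j:])
--         return out
--
--     def msort(xs):
--         if len(xs) < 2:
--             return xs
--         m = len(xs) // 2
--         return mezcla(msort(xs[:m]), msort(xs[m:]))
--
--     pendientes = msort([x for x in lista if x > 0])
--     res = []
--     for x in reversed(lista):
--         res.append(pendientes.pop() if x > 0 else x)
--     res.reverse()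
--     return res
-- ===== Notes on version B (the rewrite author's own statement) =====
-- stated objective: alternative
-- what changed: B sorts the positives with a hand-written top-down merge sort instead of the library sort, and rebuilds the list back-to-front, popping the largest remaining sorted value at each positive slot, instead of A's forward pass with a running counter into the sorted list.
import Mathlib
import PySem

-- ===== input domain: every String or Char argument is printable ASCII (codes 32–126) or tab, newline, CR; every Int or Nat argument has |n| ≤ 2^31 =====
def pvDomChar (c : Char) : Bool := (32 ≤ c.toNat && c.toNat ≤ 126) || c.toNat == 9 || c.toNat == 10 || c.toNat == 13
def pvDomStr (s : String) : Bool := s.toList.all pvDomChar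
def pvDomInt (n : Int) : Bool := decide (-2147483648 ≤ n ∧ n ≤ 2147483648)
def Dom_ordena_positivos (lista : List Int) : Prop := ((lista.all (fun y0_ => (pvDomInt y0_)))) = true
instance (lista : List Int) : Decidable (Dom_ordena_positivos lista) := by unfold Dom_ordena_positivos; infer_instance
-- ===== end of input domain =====

-- B sorts the positives with a hand-written top-down merge sort and rebuilds the
-- list back-to-front, popping the largest remaining sorted value at each positive
-- slot (alternative decomposition; no speed claim).


-- ===== PORT A =====
-- positivos[i] is ported as List.getD (i is a Nat counter, always in range in A's loop,
-- so Python's IndexError is unreachable and the default is never used).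
def ordena_positivos (lista : List Int) : List Int :=
  let positivos : List Int := PySem.List.sorted (lista.filter (fun x => decide (0 < x))) (fun x => x) false
  (lista.foldl
    (fun (st : List Int × Nat) x =>
      if 0 < x then (st.1 ++ [positivos.getD st.2 0], st.2 + 1)
      else (st.1 ++ [x], st.2))
    ([], 0)).1

-- ===== PORT B =====
-- Source B's mezcla: the two-cursor while loop over a and b, then the two extends.
def mezcla : List Int → List Int → List Int
  | [], b => b
  | a, [] => a
  | x :: a, y :: b => if y < x then y :: mezcla (x :: a) b else x :: mezcla a (y :: b)
termination_by a b => a.length + b.length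

-- Source B's msort: len(xs)//2 is a Nat halving (len is nonnegative), xs[:m]/xs[m:] are take/drop.
def msort (xs : List Int) : List Int :=
  if xs.length < 2 then xs
  else mezcla (msort (xs.take (xs.length / 2))) (msort (xs.drop (xs.length / 2)))
termination_by xs.length
decreasing_by
  · simp only [List.length_take]; omega
  · simp only [List.length_drop]; omega

-- pendientes.pop() is ported as getLastD/dropLast; the pop is always on a nonempty
-- list in Source B (one sorted positive per positive slot), so the default 0 is unreachable.
def ordena_positivos_alt (lista : List Int) : List Int :=
  let pendientes : List Int := msort (lista.filter (fun x => decide (0 < x)))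
  ((lista.reverse.foldl
      (fun (st : List Int × List Int) x =>
        if 0 < x then (st.1 ++ [st.2.getLastD 0], st.2.dropLast)
        else (st.1 ++ [x], st.2))
      ([], pendientes)).1).reverse

-- ===== PRECONDITION & SPEC =====
def Spec_ordena_positivos (lista : List Int) (out : List Int) : Prop := out = ordena_positivos_alt lista
instance (lista : List Int) (out : List Int) : Decidable (Spec_ordena_positivos lista out) := by unfold Spec_ordena_positivos; infer_instance

-- ===== CLAIM (what is proved, stated in full; the proofs are below) =====
def Claim_equal_ordena_positivos : Prop := ∀ (lista : List Int), Dom_ordena_positivos lista → Spec_ordena_positivos lista (ordena_positivos lista)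

-- ===== LEMMAS AND PROOFS =====

-- Common description of the result: walk the list, consuming ps at positive slots.
def goP : List Int → List Int → List Int
  | [], _ => []
  | x :: xs, ps => if 0 < x then ps.headD 0 :: goP xs ps.tail else x :: goP xs ps

theorem foldA (ps : List Int) : ∀ (xs res : List Int) (i : Nat),
    (xs.foldl
      (fun (st : List Int × Nat) x =>
        if 0 < x then (st.1 ++ [ps.getD st.2 0], st.2 + 1)
        else (st.1 ++ [x], st.2))
      (res, i)).1 = res ++ goP xs (ps.drop i) := by
  intro xs
  induction xs with
  | nil => intro res i; simp [goP]
  | cons x xs ih =>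
    intro res i
    by_cases hx : 0 < x
    · simp only [List.foldl_cons, if_pos hx]
      rw [ih]
      simp [goP, hx, List.tail_drop]
    · simp only [List.foldl_cons, if_neg hx]
      rw [ih]
      simp [goP, hx]

theorem mezcla_perm : ∀ (a b : List Int), (mezcla a b).Perm (a ++ b) := by
  intro a b
  fun_induction mezcla a b with
  | case1 b => exact List.Perm.refl b
  | case2 a h => simp
  | case3 x a y b hlt ih =>
    exact ((ih).cons y).trans
      (by simpa using (List.perm_middle (a := y) (l₁ := x :: a) (l₂ := b)).symm)
  | case4 x a y b hlt ih =>
    exact (ih).cons x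

theorem mem_mezcla {z : Int} {a b : List Int} (h : z ∈ mezcla a b) : z ∈ a ∨ z ∈ b := by
  have := (mezcla_perm a b).mem_iff.1 h
  simpa using this

theorem mezcla_pairwise : ∀ (a b : List Int),
    a.Pairwise (· ≤ ·) → b.Pairwise (· ≤ ·) → (mezcla a b).Pairwise (· ≤ ·) := by
  intro a b
  fun_induction mezcla a b with
  | case1 b => intro _ hb; simpa using hb
  | case2 a h => intro ha _; simpa using ha
  | case3 x a y b hlt ih =>
    intro ha hb
    rw [List.pairwise_cons] at hb
    rw [List.pairwise_cons]
    refine ⟨?_, ih ha hb.2⟩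
    intro z hz
    rcases mem_mezcla hz with hz | hz
    · rcases List.mem_cons.1 hz with rfl | hz
      · omega
      · have := (List.pairwise_cons.1 ha).1 z hz
        omega
    · exact hb.1 z hz
  | case4 x a y b hlt ih =>
    intro ha hb
    rw [List.pairwise_cons] at ha
    rw [List.pairwise_cons]
    refine ⟨?_, ih ha.2 hb⟩
    intro z hz
    rcases mem_mezcla hz with hz | hz
    · exact ha.1 z hz
    · rcases List.mem_cons.1 hz with rfl | hz
      · omega
      · have := (List.pairwise_cons.1 hb).1 z hz
        omega

theorem msort_perm (xs : List Int) : (msort xs).Perm xs := by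
  fun_induction msort xs with
  | case1 xs h => exact List.Perm.refl xs
  | case2 xs h ih1 ih2 =>
    have h1 := (mezcla_perm (msort (xs.take (xs.length / 2))) (msort (xs.drop (xs.length / 2))))
    have h2 := List.Perm.append ih1 ih2
    have h3 : xs.take (xs.length / 2) ++ xs.drop (xs.length / 2) = xs := List.take_append_drop _ _
    exact (h1.trans h2).trans (by rw [h3])

theorem msort_pairwise (xs : List Int) : (msort xs).Pairwise (· ≤ ·) := by
  fun_induction msort xs with
  | case1 xs h =>
    match xs, h with
    | [], _ => simp
    | [x], _ => simp
  | case2 xs h ih1 ih2 => exact mezcla_pairwise _ _ ih1 ih2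

theorem msort_eq_sorted (xs : List Int) :
    msort xs = PySem.List.sorted xs (fun x => x) false :=
  (PySem.List.sorted_id_eq_of_perm_of_pairwise xs (msort xs) (msort_perm xs) (msort_pairwise xs)).symm

theorem take_getLastD (ps : List Int) (m : Nat) (h1 : 1 ≤ m) (h2 : m ≤ ps.length) :
    (ps.take m).getLastD 0 = (ps.drop (m - 1)).headD 0 := by
  have hlen : (ps.take m).length = m := by simp; omega
  rw [List.getLastD_eq_getLast?, List.getLast?_eq_getElem?, hlen,
      List.headD_eq_head?, List.head?_drop, List.getElem?_take, if_pos (by omega)]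

theorem dropLast_take (ps : List Int) (m : Nat) (h2 : m ≤ ps.length) :
    (ps.take m).dropLast = ps.take (m - 1) := by
  rw [List.dropLast_eq_take, List.take_take, List.length_take]
  congr 1
  omega

theorem foldB : ∀ (xs ps res : List Int),
    xs.countP (fun x => decide (0 < x)) ≤ ps.length →
    xs.reverse.foldl
      (fun (st : List Int × List Int) x =>
        if 0 < x then (st.1 ++ [st.2.getLastD 0], st.2.dropLast)
        else (st.1 ++ [x], st.2))
      (res, ps)
    = (res ++ (goP xs (ps.drop (ps.length - xs.countP (fun x => decide (0 < x))))).reverse,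
       ps.take (ps.length - xs.countP (fun x => decide (0 < x)))) := by
  intro xs
  induction xs with
  | nil =>
    intro ps res _
    simp [goP]
  | cons x xs ih =>
    intro ps res hlen
    have hk' : xs.countP (fun x => decide (0 < x)) ≤ ps.length := by
      rw [List.countP_cons] at hlen; omega
    rw [List.reverse_cons, List.foldl_append, ih ps res hk']
    set k' := xs.countP (fun x => decide (0 < x)) with hk'def
    by_cases hx : 0 < x
    · have hk : (x :: xs).countP (fun x => decide (0 < x)) = k' + 1 := by
        rw [List.countP_cons, ← hk'def]; simp [hx]
      have h1 : 1 ≤ ps.length - k' := by rw [hk] at hlen; omega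
      simp only [List.foldl_cons, List.foldl_nil, if_pos hx, hk]
      rw [take_getLastD ps (ps.length - k') h1 (by omega),
          dropLast_take ps (ps.length - k') (by omega)]
      have hd : ps.length - (k' + 1) = (ps.length - k') - 1 := by omega
      rw [hd]
      refine Prod.ext ?_ rfl
      · show res ++ (goP xs (ps.drop (ps.length - k'))).reverse ++ [(ps.drop (ps.length - k' - 1)).headD 0]
            = res ++ (goP (x :: xs) (ps.drop (ps.length - k' - 1))).reverse
        rw [show goP (x :: xs) (ps.drop (ps.length - k' - 1))
              = (ps.drop (ps.length - k' - 1)).headD 0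
                :: goP xs (ps.drop (ps.length - k' - 1)).tail from by simp [goP, hx]]
        rw [List.tail_drop, show ps.length - k' - 1 + 1 = ps.length - k' from by omega]
        simp
    · have hk : (x :: xs).countP (fun x => decide (0 < x)) = k' := by
        rw [List.countP_cons, ← hk'def]; simp [hx]
      simp only [List.foldl_cons, List.foldl_nil, if_neg hx, hk]
      refine Prod.ext ?_ rfl
      · show res ++ (goP xs (ps.drop (ps.length - k'))).reverse ++ [x]
            = res ++ (goP (x :: xs) (ps.drop (ps.length - k'))).reverse
        rw [show goP (x :: xs) (ps.drop (ps.length - k'))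
              = x :: goP xs (ps.drop (ps.length - k')) from by simp [goP, hx]]
        simp

-- ===== VERDICT (by name: the statement is the Claim_ definition above) =====
theorem ordena_positivos_spec : Claim_equal_ordena_positivos := by
  intro lista _
  unfold Spec_ordena_positivos ordena_positivos ordena_positivos_alt
  dsimp only
  rw [foldA, msort_eq_sorted]
  set ps := PySem.List.sorted (lista.filter (fun x => decide (0 < x))) (fun x => x) false with hps
  have hlen : ps.length = lista.countP (fun x => decide (0 < x)) := by
    rw [hps, PySem.List.length_sorted, ← List.countP_eq_length_filter]
  rw [foldB lista ps [] (le_of_eq hlen.symm)]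
  rw [show ps.length - lista.countP (fun x => decide (0 < x)) = 0 from by omega]
  simp
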